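-- pv_equiv track=rewrite | github.com/wittawas19/Python-Lab | Chapter2/63010885_Lab02_02.py | weirdSubtract
-- ===== SOURCE A (Python) =====
-- def weirdSubtract(n,k):
--     while k > 0 :
--
--         if n % 10 == 0 :
--             n //= 10
--         else :
--             n -= 1
--         k -= 1
--     return n
-- ===== SOURCE B (Python) =====
-- def weirdSubtract(n, k):
--     while k > 0:
--         if n == 0:
--             return 0
--         if n == -1:
--             r = k % 10
--             return -1 if r == 0 else -1 - r
--         d = n % 10
--         if d == 0:
--             n //= 10
--             k -= 1
--         else:
--             t = min(d, k)
--             n -= t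
--             k -= t
--     return n
-- ===== Notes on version B (the rewrite author's own statement) =====
-- stated objective: faster
-- what changed: Instead of simulating all k single steps, B batches consecutive decrements as one subtraction of min(last_digit,k), short-circuits the fixed point 0, and resolves the length-10 cycle at -1 with a closed-form k%10, making the loop run O(log|n|) times instead of O(k).
import Mathlib
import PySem

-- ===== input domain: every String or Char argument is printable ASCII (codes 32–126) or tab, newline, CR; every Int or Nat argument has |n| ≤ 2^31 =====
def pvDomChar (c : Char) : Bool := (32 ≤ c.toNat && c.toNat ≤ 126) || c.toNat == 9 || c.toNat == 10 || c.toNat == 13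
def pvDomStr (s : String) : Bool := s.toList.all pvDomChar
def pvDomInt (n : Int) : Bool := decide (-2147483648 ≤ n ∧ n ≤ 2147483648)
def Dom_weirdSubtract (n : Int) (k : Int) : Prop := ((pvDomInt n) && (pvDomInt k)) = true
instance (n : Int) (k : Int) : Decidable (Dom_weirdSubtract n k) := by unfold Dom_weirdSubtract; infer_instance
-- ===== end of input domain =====

-- B replaces A's k single steps by batched subtraction of min(last digit, k), a 0 fixed point,
-- and a closed form for the length-10 cycle at -1: O(log|n|) loop iterations instead of O(k).

-- ===== PORT A =====
def weirdSubtract (n : Int) (k : Int) : Int :=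
  if _h : k > 0 then
    if PySem.Int.mod n 10 = 0 then
      weirdSubtract (PySem.Int.floordiv n 10) (k - 1)
    else
      weirdSubtract (n - 1) (k - 1)
  else n
termination_by k.toNat
decreasing_by all_goals omega

-- ===== PORT B =====
def weirdSubtract_alt (n : Int) (k : Int) : Int :=
  if _h : k > 0 then
    if n = 0 then 0
    else if n = -1 then
      let r := PySem.Int.mod k 10
      if r = 0 then -1 else -1 - r
    else
      let d := PySem.Int.mod n 10
      if hd : d = 0 then
        weirdSubtract_alt (PySem.Int.floordiv n 10) (k - 1)
      else
        let t := min d k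
        weirdSubtract_alt (n - t) (k - t)
  else n
termination_by k.toNat
decreasing_by
  · omega
  · have h10 : (0:Int) < 10 := by norm_num
    have := PySem.Int.mod_eq_emod_of_pos (a := n) h10
    simp only [this] at hd ⊢
    have := Int.emod_nonneg n (by norm_num : (10:Int) ≠ 0)
    omega

-- ===== PRECONDITION & SPEC =====
def Spec_weirdSubtract (n : Int) (k : Int) (out : Int) : Prop := out = weirdSubtract_alt n k
instance (n : Int) (k : Int) (out : Int) : Decidable (Spec_weirdSubtract n k out) := by unfold Spec_weirdSubtract; infer_instance

-- ===== CLAIM (what is proved, stated in full; the proofs are below) =====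
def Claim_equal_weirdSubtract : Prop := ∀ (n : Int) (k : Int), Dom_weirdSubtract n k → Spec_weirdSubtract n k (weirdSubtract n k)

-- ===== LEMMAS AND PROOFS =====

lemma mod10 (n : Int) : PySem.Int.mod n 10 = n % 10 :=
  PySem.Int.mod_eq_emod_of_pos (by norm_num)

lemma A_zero : ∀ (m : Nat) (k : Int), k.toNat = m → weirdSubtract 0 k = 0 := by
  intro m
  induction m with
  | zero =>
    intro k hk
    rw [weirdSubtract]
    have : ¬ k > 0 := by omega
    simp [this]
  | succ m ih =>
    intro k hk
    rw [weirdSubtract]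
    have hkpos : k > 0 := by omega
    have h0 : PySem.Int.mod (0:Int) 10 = 0 := by rw [mod10]; decide
    have hf : PySem.Int.floordiv (0:Int) 10 = 0 := by decide
    simp only [hkpos, dite_true, h0, if_true, hf]
    exact ih (k - 1) (by omega)

lemma A_cycle : ∀ (m : Nat) (n k : Int), k.toNat = m → 0 ≤ k → -10 ≤ n → n ≤ -1 →
    weirdSubtract n k = -(((-n - 1 + k) % 10) + 1) := by
  intro m
  induction m with
  | zero =>
    intro n k hk hk0 hn1 hn2
    have hke : k = 0 := by omega
    subst hke
    rw [weirdSubtract]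
    simp only [show ¬ (0:Int) > 0 by omega, dite_false]
    omega
  | succ m ih =>
    intro n k hk hk0 hn1 hn2
    have hkpos : k > 0 := by omega
    rw [weirdSubtract]
    by_cases hten : n = -10
    · subst hten
      have h0 : PySem.Int.mod (-10:Int) 10 = 0 := by rw [mod10]; decide
      have hf : PySem.Int.floordiv (-10:Int) 10 = -1 := by decide
      simp only [hkpos, dite_true, h0, if_true, hf]
      rw [ih (-1) (k - 1) (by omega) (by omega) (by omega) (by omega)]
      omega
    · have hm : PySem.Int.mod n 10 = n + 10 := by rw [mod10]; omega
      have hm0 : ¬ PySem.Int.mod n 10 = 0 := by omega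
      simp only [hkpos, dite_true, hm0, if_false]
      rw [ih (n - 1) (k - 1) (by omega) (by omega) (by omega) (by omega)]
      omega

lemma A_batch : ∀ (t : Nat) (n k : Int), (t : Int) ≤ PySem.Int.mod n 10 → (t : Int) ≤ k →
    weirdSubtract n k = weirdSubtract (n - t) (k - t) := by
  intro t
  induction t with
  | zero => intro n k _ _; simp
  | succ t ih =>
    intro n k hd hkt
    have hkpos : k > 0 := by push_cast at hkt; omega
    rw [weirdSubtract]
    have hnd : n % 10 ≥ (t : Int) + 1 := by rw [mod10] at hd; push_cast at hd; omega
    have h10 := Int.emod_nonneg n (by norm_num : (10:Int) ≠ 0)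
    have hlt := Int.emod_lt_of_pos n (by norm_num : (0:Int) < 10)
    have hm0 : ¬ PySem.Int.mod n 10 = 0 := by rw [mod10]; omega
    simp only [hkpos, dite_true, hm0, if_false]
    have hstep : (n - 1) % 10 = n % 10 - 1 := by omega
    rw [ih (n - 1) (k - 1) (by rw [mod10, hstep]; omega) (by push_cast at hkt; omega)]
    have e1 : n - 1 - (t : Int) = n - ((t : Nat).succ : Int) := by push_cast; ring
    have e2 : k - 1 - (t : Int) = k - ((t : Nat).succ : Int) := by push_cast; ring
    rw [e1, e2]

lemma main_eq : ∀ (m : Nat) (n k : Int), k.toNat = m → weirdSubtract n k = weirdSubtract_alt n k := by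
  intro m
  induction m using Nat.strong_induction_on with
  | _ m ih =>
    intro n k hk
    by_cases hkpos : k > 0
    · rw [weirdSubtract_alt]
      simp only [hkpos, dite_true]
      by_cases h0 : n = 0
      · subst h0
        simp only [if_true]
        exact A_zero m k hk
      · simp only [h0, if_false]
        by_cases h1 : n = -1
        · subst h1
          simp only [if_true]
          rw [A_cycle m (-1) k hk (by omega) (by omega) (by omega)]
          rw [mod10]
          have := Int.emod_nonneg k (by norm_num : (10:Int) ≠ 0)
          have := Int.emod_lt_of_pos k (by norm_num : (0:Int) < 10)
          split <;> omega
        · simp only [h1, if_false]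
          have hmn := Int.emod_nonneg n (by norm_num : (10:Int) ≠ 0)
          have hml := Int.emod_lt_of_pos n (by norm_num : (0:Int) < 10)
          by_cases hd : PySem.Int.mod n 10 = 0
          · rw [dif_pos hd]
            rw [weirdSubtract]
            simp only [hkpos, dite_true, hd, if_true]
            exact ih (k - 1).toNat (by omega) _ (k - 1) rfl
          · rw [dif_neg hd]
            set t : Int := min (PySem.Int.mod n 10) k with ht
            have htpos : 1 ≤ t := by rw [ht, mod10]; rw [mod10] at hd; omega
            have htk : t ≤ k := min_le_right _ _
            have htd : t ≤ PySem.Int.mod n 10 := min_le_left _ _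
            have hcast : ((t.toNat : Nat) : Int) = t := by omega
            rw [A_batch t.toNat n k (by rw [hcast]; exact htd) (by rw [hcast]; exact htk), hcast]
            exact ih (k - t).toNat (by omega) _ (k - t) rfl
    · rw [weirdSubtract, weirdSubtract_alt]
      simp [hkpos]

-- ===== VERDICT (by name: the statement is the Claim_ definition above) =====
theorem weirdSubtract_spec : Claim_equal_weirdSubtract := by
  intro n k _
  unfold Spec_weirdSubtract
  exact main_eq k.toNat n k rfl
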